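-- pv_equiv track=rewrite | github.com/geodavic/tropical-reconstruction | tropical_reconstruction/function/function.py | _zip
-- ===== SOURCE A (Python) =====
-- def _zip(mons, coeffs):
--     """Create the poly dictionary, combining like terms."""
--     poly = {}
--     for m, c in zip(mons, coeffs):
--         if m in poly:
--             poly[m] = max(c, poly[m])
--         else:
--             poly[m] = c
--     return poly
-- ===== SOURCE B (Python) =====
-- def _zip(mons, coeffs):
--     """Create the poly dictionary, combining like terms.
--
--     Two separated passes: first group every coefficient by its monomial,
--     then reduce each group with max."""
--     groups = {}
--     for m, c in zip(mons, coeffs):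
--         groups.setdefault(m, []).append(c)
--     return {m: max(cs) for m, cs in groups.items()}
-- ===== Notes on version B (the rewrite author's own statement) =====
-- stated objective: alternative
-- what changed: Replaces A's single-pass in-place running max with a group-then-reduce decomposition: one pass accumulates coefficient lists per monomial, a second pass reduces each group with max.
import Mathlib
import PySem

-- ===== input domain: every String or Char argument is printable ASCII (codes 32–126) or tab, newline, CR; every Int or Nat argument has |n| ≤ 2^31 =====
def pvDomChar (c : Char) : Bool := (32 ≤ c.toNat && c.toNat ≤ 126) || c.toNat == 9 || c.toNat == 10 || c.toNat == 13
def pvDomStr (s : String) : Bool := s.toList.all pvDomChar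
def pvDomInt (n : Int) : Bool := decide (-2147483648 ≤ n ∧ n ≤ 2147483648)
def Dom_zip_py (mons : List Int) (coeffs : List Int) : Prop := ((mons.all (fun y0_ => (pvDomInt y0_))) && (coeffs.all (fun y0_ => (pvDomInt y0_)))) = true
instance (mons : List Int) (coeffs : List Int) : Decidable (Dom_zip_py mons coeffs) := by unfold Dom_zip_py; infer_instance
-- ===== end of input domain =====

-- B replaces A's single-pass running max with a group-then-reduce decomposition
-- (accumulate coefficient lists per monomial, then take max of each group); same cost, proved equal.

-- ===== PORT A =====
-- poly = {}; for m, c in zip(mons, coeffs): poly[m] = max(c, poly[m]) if m in poly else c; return poly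
-- (poly[m] inside the true branch is guarded by 'm in poly', so getD's default is never read)
def zip_py (mons : List Int) (coeffs : List Int) : List (Int × Int) :=
  ((List.zip mons coeffs).foldl
    (fun poly mc =>
      if poly.contains mc.1 then
        poly.insert mc.1 (max mc.2 (poly.getD mc.1 0))
      else
        poly.insert mc.1 mc.2)
    (PySem.Dict.empty : PySem.Dict Int Int)).items

-- ===== PORT B =====
-- max(cs) for a nonempty list of ints (every group in B holds at least one coefficient)
def pyMaxList (cs : List Int) : Int :=
  match cs with
  | [] => 0
  | c :: rest => rest.foldl max c

-- groups = {}; for m, c in zip(mons, coeffs): groups.setdefault(m, []).append(c)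
-- return {m: max(cs) for m, cs in groups.items()}   (keys of groups are distinct, so the
-- comprehension yields exactly the groups' items with each value reduced by max)
def zip_py_alt (mons : List Int) (coeffs : List Int) : List (Int × Int) :=
  let groups :=
    (List.zip mons coeffs).foldl
      (fun d mc => d.modify mc.1 [] (· ++ [mc.2]))
      (PySem.Dict.empty : PySem.Dict Int (List Int))
  groups.items.map (fun p => (p.1, pyMaxList p.2))

-- ===== PRECONDITION & SPEC =====
def Spec_zip_py (mons : List Int) (coeffs : List Int) (out : List (Int × Int)) : Prop := out = zip_py_alt mons coeffs
instance (mons : List Int) (coeffs : List Int) (out : List (Int × Int)) : Decidable (Spec_zip_py mons coeffs out) := by unfold Spec_zip_py; infer_instance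

-- ===== CLAIM (what is proved, stated in full; the proofs are below) =====
def Claim_equal_zip_py : Prop := ∀ (mons : List Int) (coeffs : List Int), Dom_zip_py mons coeffs → Spec_zip_py mons coeffs (zip_py mons coeffs)

-- ===== LEMMAS AND PROOFS =====

-- the value-wise max reduction of a grouping dict
def mapVals (d : PySem.Dict Int (List Int)) : PySem.Dict Int Int :=
  PySem.Dict.mk (d.items.map (fun p => (p.1, pyMaxList p.2)))

lemma contains_mapVals (d : PySem.Dict Int (List Int)) (k : Int) :
    (mapVals d).contains k = d.contains k := by
  simp only [mapVals, PySem.Dict.contains, List.any_map]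
  rfl

lemma items_mapVals (d : PySem.Dict Int (List Int)) :
    (mapVals d).items = d.items.map (fun p => (p.1, pyMaxList p.2)) := rfl

lemma get?_mapVals (d : PySem.Dict Int (List Int)) (k : Int) :
    (mapVals d).get? k = (d.get? k).map pyMaxList := by
  obtain ⟨l⟩ := d
  induction l with
  | nil => simp [mapVals, PySem.Dict.get?]
  | cons p rest ih =>
    have hm : mapVals (PySem.Dict.mk (p :: rest))
        = PySem.Dict.mk ((p.1, pyMaxList p.2) :: rest.map (fun q => (q.1, pyMaxList q.2))) := rfl
    rw [hm, PySem.Dict.get?_mk_cons, PySem.Dict.get?_mk_cons]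
    by_cases h : p.1 == k
    · simp [h]
    · simp only [h, Bool.false_eq_true, if_false]
      simpa [mapVals] using ih

lemma pyMaxList_append (cs : List Int) (c : Int) (h : cs ≠ []) :
    pyMaxList (cs ++ [c]) = max c (pyMaxList cs) := by
  obtain ⟨a, rest, rfl⟩ := List.exists_cons_of_ne_nil h
  simp [pyMaxList, List.foldl_append, max_comm]

-- one loop step commutes with mapVals
lemma step_commute (d : PySem.Dict Int (List Int)) (m c : Int)
    (hnd : d.keys.Nodup) (hne : ∀ p ∈ d.items, p.2 ≠ []) :
    (if (mapVals d).contains m then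
        (mapVals d).insert m (max c ((mapVals d).getD m 0))
      else (mapVals d).insert m c)
      = mapVals (d.modify m [] (· ++ [c])) := by
  rw [contains_mapVals]
  by_cases h : d.contains m
  · -- m already present: both sides rewrite the existing entry in place
    obtain ⟨cs, hcs⟩ : ∃ cs, d.get? m = some cs := by
      rcases hv : d.get? m with _ | cs
      · rw [PySem.Dict.get?_eq_none_iff_contains] at hv; simp [h] at hv
      · exact ⟨cs, rfl⟩
    have hmem : (m, cs) ∈ d.items := PySem.Dict.mem_items_of_get?_eq_some _ hcs
    have hcsne : cs ≠ [] := hne _ hmem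
    have hgetD : d.getD m [] = cs := by simp [PySem.Dict.getD, hcs]
    have hgetDA : (mapVals d).getD m 0 = pyMaxList cs := by
      simp [PySem.Dict.getD, get?_mapVals, hcs]
    have hcontM : (mapVals d).contains m := by rw [contains_mapVals]; exact h
    rw [if_pos h, hgetDA, PySem.Dict.modify, hgetD]
    apply PySem.Dict.ext
    rw [PySem.Dict.items_insert_of_contains _ _ hcontM, items_mapVals, items_mapVals,
        PySem.Dict.items_insert_of_contains _ _ h, List.map_map, List.map_map]
    apply List.map_congr_left
    intro p hp
    by_cases hpm : p.1 == m
    · -- keys are Nodup, so the matched entry is exactly (m, cs)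
      have : p = (m, cs) := by
        have h1 : d.get? p.1 = some p.2 := PySem.Dict.get?_of_mem_items _ hp hnd
        have h2 : p.1 = m := by simpa using hpm
        rw [h2, hcs] at h1
        obtain ⟨p1, p2⟩ := p
        simp_all
      subst this
      simp [Function.comp, pyMaxList_append cs c hcsne]
    · simp [Function.comp, hpm]
  · -- fresh key: both sides append one entry
    have hgetD : d.getD m [] = [] :=
      PySem.Dict.getD_of_not_contains d [] (by simpa using h)
    have hcontM : (mapVals d).contains m = false := by
      rw [contains_mapVals]; simpa using h
    rw [if_neg h, PySem.Dict.modify, hgetD, List.nil_append]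
    apply PySem.Dict.ext
    rw [PySem.Dict.items_insert_of_not_contains _ _ hcontM, items_mapVals, items_mapVals,
        PySem.Dict.items_insert_of_not_contains _ _ (by simpa using h), List.map_append]
    simp [pyMaxList]

-- the modify loop keeps keys Nodup and values nonempty
lemma modify_preserves (d : PySem.Dict Int (List Int)) (m c : Int)
    (hnd : d.keys.Nodup) (hne : ∀ p ∈ d.items, p.2 ≠ []) :
    (d.modify m [] (· ++ [c])).keys.Nodup ∧
      ∀ p ∈ (d.modify m [] (· ++ [c])).items, p.2 ≠ [] := by
  constructor
  · exact PySem.Dict.nodup_keys_insert _ _ _ hnd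
  · intro p hp
    rw [PySem.Dict.modify, PySem.Dict.mem_items_insert] at hp
    rcases hp with rfl | ⟨hp, _⟩
    · simp
    · exact hne _ hp

-- the whole loop commutes with mapVals
lemma loop_commute (l : List (Int × Int)) (d : PySem.Dict Int (List Int))
    (hnd : d.keys.Nodup) (hne : ∀ p ∈ d.items, p.2 ≠ []) :
    l.foldl
      (fun poly mc =>
        if poly.contains mc.1 then poly.insert mc.1 (max mc.2 (poly.getD mc.1 0))
        else poly.insert mc.1 mc.2)
      (mapVals d)
      = mapVals (l.foldl (fun d mc => d.modify mc.1 [] (· ++ [mc.2])) d) := by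
  induction l generalizing d with
  | nil => rfl
  | cons mc rest ih =>
    obtain ⟨hnd', hne'⟩ := modify_preserves d mc.1 mc.2 hnd hne
    simp only [List.foldl_cons]
    rw [step_commute d mc.1 mc.2 hnd hne, ih _ hnd' hne']

-- ===== VERDICT (by name: the statement is the Claim_ definition above) =====
theorem zip_py_spec : Claim_equal_zip_py := by
  intro mons coeffs _
  show zip_py mons coeffs = zip_py_alt mons coeffs
  unfold zip_py zip_py_alt
  have hempty : (PySem.Dict.empty : PySem.Dict Int Int)
      = mapVals (PySem.Dict.empty : PySem.Dict Int (List Int)) := by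
    apply PySem.Dict.ext; simp [mapVals, PySem.Dict.empty]
  rw [hempty, loop_commute _ _ (by simp [PySem.Dict.empty, PySem.Dict.keys])
        (by simp [PySem.Dict.empty])]
  rfl
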